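-- pv_equiv track=rewrite | github.com/MissyMedina/AutoDevCore | fix_formatting.py | fix_indentation_issues
-- ===== SOURCE A (Python) =====
-- def fix_indentation_issues(content):
--     """Fix basic indentation issues."""
--     lines = content.split("\n")
--     fixed_lines = []
--     changes = 0
--
--     for line in lines:
--         original_line = line
--
--         # Convert tabs to 4 spaces (Python standard)
--         if "\t" in line:
--             line = line.replace("\t", "    ")
--             changes += 1
--
--         fixed_lines.append(line)
--
--     return "\n".join(fixed_lines), changes
-- ===== SOURCE B (Python) =====
-- def fix_indentation_issues(content):
--     """Fix basic indentation issues."""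
--     fixed = content.replace("\t", "    ")
--     changes = sum(1 for line in content.split("\n") if "\t" in line)
--     return fixed, changes
-- ===== Notes on version B (the rewrite author's own statement) =====
-- stated objective: simpler
-- what changed: B replaces the interleaved per-line transform-and-count loop by a single whole-string tab-to-spaces replace plus a separate counting pass over the split lines, relying on tab substitution being independent of line boundaries.
import Mathlib
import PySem

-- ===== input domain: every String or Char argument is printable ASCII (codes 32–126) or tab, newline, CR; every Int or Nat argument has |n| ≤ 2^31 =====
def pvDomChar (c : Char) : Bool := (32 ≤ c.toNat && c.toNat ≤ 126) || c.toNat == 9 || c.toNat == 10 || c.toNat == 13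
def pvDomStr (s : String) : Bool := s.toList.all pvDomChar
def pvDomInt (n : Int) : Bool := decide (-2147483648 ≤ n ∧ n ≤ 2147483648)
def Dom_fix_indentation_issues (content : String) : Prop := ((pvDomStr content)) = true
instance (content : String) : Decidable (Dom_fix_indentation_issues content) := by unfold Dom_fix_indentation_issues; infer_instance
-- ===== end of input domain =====

-- B computes the fixed text by one whole-string tab replacement and the change count by a separate pass over the split lines (simpler decomposition); same return value as A.
-- ===== PORT A =====
def fix_indentation_issues (content : String) : String × Int :=
  let lines := PySem.Chars.splitOn content.toList ['\n']
  let r := lines.foldl (fun (st : List (List Char) × Int) line =>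
    if PySem.Chars.isIn ['\t'] line then
      (st.1 ++ [PySem.Chars.replace line ['\t'] [' ', ' ', ' ', ' ']], st.2 + 1)
    else
      (st.1 ++ [line], st.2)) ([], 0)
  (String.mk (PySem.Chars.join ['\n'] r.1), r.2)

-- ===== PORT B =====
def fix_indentation_issues_alt (content : String) : String × Int :=
  let fixed := PySem.Chars.replace content.toList ['\t'] [' ', ' ', ' ', ' ']
  let changes := ((PySem.Chars.splitOn content.toList ['\n']).filter
    (fun line => PySem.Chars.isIn ['\t'] line)).length
  (String.mk fixed, (changes : Int))

-- ===== PRECONDITION & SPEC =====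
def Spec_fix_indentation_issues (content : String) (out : String × Int) : Prop := out = fix_indentation_issues_alt content
instance (content : String) (out : String × Int) : Decidable (Spec_fix_indentation_issues content out) := by unfold Spec_fix_indentation_issues; infer_instance

-- ===== CLAIM (what is proved, stated in full; the proofs are below) =====
def Claim_equal_fix_indentation_issues : Prop := ∀ (content : String), Dom_fix_indentation_issues content → Spec_fix_indentation_issues content (fix_indentation_issues content)

-- ===== LEMMAS AND PROOFS =====

-- character-level substitution performed by replace(line, "\t", "    ")
def pvSub (c : Char) : List Char := if c = '\t' then [' ', ' ', ' ', ' '] else [c]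

-- structural model of splitOn on the single-char separator '\n'
def pvConsHead (x : List Char) : List (List Char) → List (List Char)
  | [] => [x]
  | h :: r => (x ++ h) :: r

def pvSplit : List Char → List (List Char)
  | [] => [[]]
  | c :: t => if c = '\n' then [] :: pvSplit t else pvConsHead [c] (pvSplit t)

lemma pvSplit_ne_nil (l : List Char) : pvSplit l ≠ [] := by
  cases l with
  | nil => simp [pvSplit]
  | cons c t =>
    simp only [pvSplit]
    split
    · simp
    · cases h : pvSplit t <;> simp [pvConsHead]

lemma pvConsHead_nil (l : List (List Char)) (h : l ≠ []) : pvConsHead [] l = l := by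
  cases l with
  | nil => exact absurd rfl h
  | cons a r => simp [pvConsHead]

lemma pvConsHead_consHead (x y : List Char) (l : List (List Char)) :
    pvConsHead x (pvConsHead y l) = pvConsHead (x ++ y) l := by
  cases l <;> simp [pvConsHead]

lemma splitOn_go_eq (fuel : Nat) (l cur : List Char) (acc : List (List Char))
    (h : l.length ≤ fuel) :
    PySem.Chars.splitOn.go ['\n'] fuel l cur acc
      = acc.reverse ++ pvConsHead cur.reverse (pvSplit l) := by
  induction fuel generalizing l cur acc with
  | zero =>
    have hl : l = [] := List.eq_nil_of_length_eq_zero (Nat.le_zero.mp h)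
    subst hl
    simp [PySem.Chars.splitOn.go, pvSplit, pvConsHead]
  | succ n ih =>
    cases l with
    | nil => simp [PySem.Chars.splitOn.go, pvSplit, pvConsHead]
    | cons c t =>
      by_cases hc : c = '\n'
      · subst hc
        have : PySem.Chars.splitOn.go ['\n'] (n+1) ('\n' :: t) cur acc
            = PySem.Chars.splitOn.go ['\n'] n t [] (cur.reverse :: acc) := by
          simp [PySem.Chars.splitOn.go, List.isPrefixOf]
        rw [this, ih t [] (cur.reverse :: acc) (by simpa using Nat.lt_succ_iff.mp (by simpa using h))]
        rw [List.reverse_nil, pvConsHead_nil _ (pvSplit_ne_nil t)]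
        simp [pvSplit, pvConsHead]
      · have : PySem.Chars.splitOn.go ['\n'] (n+1) (c :: t) cur acc
            = PySem.Chars.splitOn.go ['\n'] n t (c :: cur) acc := by
          simp [PySem.Chars.splitOn.go, List.isPrefixOf, Ne.symm hc]
        rw [this, ih t (c :: cur) acc (by simpa using Nat.lt_succ_iff.mp (by simpa using h))]
        simp [pvSplit, hc, pvConsHead_consHead]

lemma splitOn_eq (s : List Char) : PySem.Chars.splitOn s ['\n'] = pvSplit s := by
  unfold PySem.Chars.splitOn
  rw [splitOn_go_eq (s.length + 1) s [] [] (Nat.le_succ _)]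
  simp [pvConsHead_nil _ (pvSplit_ne_nil s)]

lemma replace_go_eq (fuel : Nat) (l acc : List Char) (h : l.length ≤ fuel) :
    PySem.Chars.replace.go ['\t'] [' ', ' ', ' ', ' '] fuel l acc
      = acc.reverse ++ l.flatMap pvSub := by
  induction fuel generalizing l acc with
  | zero =>
    have hl : l = [] := List.eq_nil_of_length_eq_zero (Nat.le_zero.mp h)
    subst hl
    simp [PySem.Chars.replace.go]
  | succ n ih =>
    cases l with
    | nil => simp [PySem.Chars.replace.go]
    | cons c t =>
      by_cases hc : c = '\t'
      · subst hc
        have : PySem.Chars.replace.go ['\t'] [' ', ' ', ' ', ' '] (n+1) ('\t' :: t) acc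
            = PySem.Chars.replace.go ['\t'] [' ', ' ', ' ', ' '] n t
                ([' ', ' ', ' ', ' '].reverse ++ acc) := by
          simp [PySem.Chars.replace.go, List.isPrefixOf]
        rw [this, ih t _ (by simpa using Nat.lt_succ_iff.mp (by simpa using h))]
        simp [pvSub]
      · have : PySem.Chars.replace.go ['\t'] [' ', ' ', ' ', ' '] (n+1) (c :: t) acc
            = PySem.Chars.replace.go ['\t'] [' ', ' ', ' ', ' '] n t (c :: acc) := by
          simp [PySem.Chars.replace.go, List.isPrefixOf, Ne.symm hc]
        rw [this, ih t _ (by simpa using Nat.lt_succ_iff.mp (by simpa using h))]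
        simp [pvSub, hc]

lemma replace_eq (l : List Char) :
    PySem.Chars.replace l ['\t'] [' ', ' ', ' ', ' '] = l.flatMap pvSub := by
  unfold PySem.Chars.replace
  rw [if_neg (by simp), replace_go_eq l.length l [] (Nat.le_refl _)]
  simp

lemma flatMap_pvSub_no_tab (l : List Char) (h : '\t' ∉ l) : l.flatMap pvSub = l := by
  induction l with
  | nil => simp
  | cons c t ih =>
    simp only [List.mem_cons, not_or] at h
    simp [pvSub, Ne.symm h.1, ih h.2]

lemma isIn_tab (l : List Char) : PySem.Chars.isIn ['\t'] l = decide ('\t' ∈ l) := by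
  by_cases h : '\t' ∈ l
  · simp [h]
    rw [PySem.Chars.isIn_iff_infix]
    obtain ⟨p, q, rfl⟩ := List.append_of_mem h
    exact ⟨p, q, by simp⟩
  · simp [h]
    rw [PySem.Chars.isIn_eq_false_iff]
    intro hinf
    exact h (hinf.subset (by simp))

-- intercalate facts for the single-char separator
lemma inter_single (x : List Char) : ['\n'].intercalate [x] = x := by
  simp [List.intercalate]

lemma inter_cons (x h : List Char) (l : List (List Char)) :
    ['\n'].intercalate (x :: h :: l) = x ++ '\n' :: ['\n'].intercalate (h :: l) := by
  simp [List.intercalate]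

lemma inter_append_head (x h : List Char) (l : List (List Char)) :
    ['\n'].intercalate ((x ++ h) :: l) = x ++ ['\n'].intercalate (h :: l) := by
  cases l <;> simp [List.intercalate]

-- the join of the per-line substitutions is the whole-string substitution
lemma join_pvSplit (s : List Char) :
    PySem.Chars.join ['\n'] ((pvSplit s).map (fun l => l.flatMap pvSub))
      = s.flatMap pvSub := by
  simp only [PySem.Chars.join]
  induction s with
  | nil => simp [pvSplit, inter_single]
  | cons c t ih =>
    obtain ⟨a, r, hr⟩ := List.exists_cons_of_ne_nil (pvSplit_ne_nil t)
    by_cases hc : c = '\n'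
    · subst hc
      rw [show pvSplit ('\n' :: t) = [] :: pvSplit t from by simp [pvSplit], hr,
        List.map_cons, List.map_cons, List.flatMap_nil, inter_cons,
        ← List.map_cons, ← hr, ih]
      simp [pvSub]
    · rw [show pvSplit (c :: t) = pvConsHead [c] (pvSplit t) from by simp [pvSplit, hc], hr]
      simp only [pvConsHead, List.map_cons, List.flatMap_cons, List.flatMap_append,
        List.flatMap_nil, List.singleton_append, List.append_nil]
      rw [show (pvSub c ++ a.flatMap pvSub) :: r.map (fun l => l.flatMap pvSub)
            = (pvSub c ++ a.flatMap pvSub) :: r.map (fun l => l.flatMap pvSub) from rfl,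
        inter_append_head, ← List.map_cons, ← hr, ih]

-- A's fold: the accumulated lines are a map, the counter is a filter length
lemma foldA_eq (lines : List (List Char)) (acc : List (List Char)) (n : Int) :
    lines.foldl (fun (st : List (List Char) × Int) line =>
      if PySem.Chars.isIn ['\t'] line then
        (st.1 ++ [PySem.Chars.replace line ['\t'] [' ', ' ', ' ', ' ']], st.2 + 1)
      else
        (st.1 ++ [line], st.2)) (acc, n)
    = (acc ++ lines.map (fun line =>
          if PySem.Chars.isIn ['\t'] line then
            PySem.Chars.replace line ['\t'] [' ', ' ', ' ', ' ']
          else line),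
       n + ((lines.filter (fun line => PySem.Chars.isIn ['\t'] line)).length : Int)) := by
  induction lines generalizing acc n with
  | nil => simp
  | cons l t ih =>
    by_cases h : PySem.Chars.isIn ['\t'] l
    · simp only [List.foldl_cons, if_pos h, ih, List.map_cons, List.filter_cons, h]
      simp [List.append_assoc]
      omega
    · simp only [List.foldl_cons, if_neg h, ih, List.map_cons, List.filter_cons,
        Bool.not_eq_true] at *
      simp [h, List.append_assoc]

-- ===== VERDICT (by name: the statement is the Claim_ definition above) =====
theorem fix_indentation_issues_spec : Claim_equal_fix_indentation_issues := by
  intro content _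
  unfold Spec_fix_indentation_issues fix_indentation_issues fix_indentation_issues_alt
  simp only [foldA_eq, List.nil_append]
  refine Prod.ext ?_ (by simp)
  simp only
  congr 1
  rw [replace_eq, splitOn_eq]
  rw [← join_pvSplit content.toList]
  congr 1
  apply List.map_congr_left
  intro l hl
  by_cases h : PySem.Chars.isIn ['\t'] l
  · rw [if_pos h, replace_eq]
  · rw [if_neg h]
    refine (flatMap_pvSub_no_tab l ?_).symm
    intro hmem
    rw [isIn_tab] at h
    simp [hmem] at h
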